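-- pv_equiv track=rewrite | github.com/pypi-data/pypi-mirror-382 | packages/odc-stats/odc_stats-1.9.6.tar.gz/odc_stats-1.9.6/odc/stats/utils.py | mk_season_rules
-- ===== SOURCE A (Python) =====
-- def mk_season_rules(months: int, anchor: int) -> dict[int, str]:
--     """
--     Construct rules for a regular seasons
--     :param months: Length of season in months can be one of (1,2,3,4,6,12)
--     :param anchor: Start month of one of the seasons [1, 12]
--     """
--     assert months in (1, 2, 3, 4, 6, 12)
--     assert 1 <= anchor <= 12
--
--     rules: dict[int, str] = {}
--     for i in range(12 // months):
--         start_month = anchor + i * months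
--         if start_month > 12:
--             start_month -= 12
--
--         for m in range(start_month, start_month + months):
--             if m > 12:
--                 m = m - 12
--             if months == 12:
--                 rules[m] = f"{start_month:02d}--P1Y"
--             else:
--                 rules[m] = f"{start_month:02d}--P{months:d}M"
--
--     return rules
-- ===== SOURCE B (Python) =====
-- def mk_season_rules(months: int, anchor: int) -> dict[int, str]:
--     """Single flat loop over the 12 month-offsets from the anchor; each month's
--     season start is computed in closed form instead of grouping by season."""
--     assert months in (1, 2, 3, 4, 6, 12)
--     assert 1 <= anchor <= 12
--
--     period = "P1Y" if months == 12 else f"P{months:d}M"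
--     rules: dict[int, str] = {}
--     for k in range(12):
--         m = anchor + k
--         if m > 12:
--             m -= 12
--         start = anchor + (k // months) * months
--         if start > 12:
--             start -= 12
--         rules[m] = f"{start:02d}--{period}"
--     return rules
-- ===== Notes on version B (the rewrite author's own statement) =====
-- stated objective: simpler
-- what changed: Replaced A's nested season-then-month loops by one flat loop over the 12 month offsets from the anchor, computing each month's season start in closed form via k//months.
import Mathlib
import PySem

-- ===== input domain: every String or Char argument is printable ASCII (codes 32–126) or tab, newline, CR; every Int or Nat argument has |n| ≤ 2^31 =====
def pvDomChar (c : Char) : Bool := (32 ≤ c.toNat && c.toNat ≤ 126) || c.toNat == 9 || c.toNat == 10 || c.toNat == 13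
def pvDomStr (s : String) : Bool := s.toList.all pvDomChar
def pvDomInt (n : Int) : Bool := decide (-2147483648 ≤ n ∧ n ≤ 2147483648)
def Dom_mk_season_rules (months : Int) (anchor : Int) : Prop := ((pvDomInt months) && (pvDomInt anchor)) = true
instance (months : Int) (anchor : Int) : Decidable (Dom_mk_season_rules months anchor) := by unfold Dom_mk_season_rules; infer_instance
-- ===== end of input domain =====

-- B replaces A's nested season/month loops by a single flat loop over the 12 month
-- offsets with a closed-form season start (objective: simpler decomposition).

-- f"{n:02d}": str(n) zero-padded on the left to width 2 (exact for this format spec)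
def pvPad02 (n : Int) : List Char :=
  let cs := PySem.Int.toChars n
  if cs.length < 2 then '0' :: cs else cs

-- ===== PORT A =====
def mk_season_rules (months : Int) (anchor : Int) : List (Int × String) :=
  let rules : PySem.Dict Int String :=
    (PySem.List.pyRange 0 (PySem.Int.floordiv 12 months) 1).foldl
      (fun rules i =>
        let start_month := anchor + i * months
        let start_month := if start_month > 12 then start_month - 12 else start_month
        (PySem.List.pyRange start_month (start_month + months) 1).foldl
          (fun rules m =>
            let m := if m > 12 then m - 12 else m
            if months = 12 then
              rules.insert m (String.ofList (pvPad02 start_month ++ "--P1Y".toList))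
            else
              rules.insert m (String.ofList (pvPad02 start_month ++ "--P".toList ++
                PySem.Int.toChars months ++ "M".toList)))
          rules)
      PySem.Dict.empty
  rules.items

-- ===== PORT B =====
def mk_season_rules_alt (months : Int) (anchor : Int) : List (Int × String) :=
  let period : List Char :=
    if months = 12 then "P1Y".toList
    else "P".toList ++ PySem.Int.toChars months ++ "M".toList
  let rules : PySem.Dict Int String :=
    (PySem.List.pyRange 0 12 1).foldl
      (fun rules k =>
        let m := anchor + k
        let m := if m > 12 then m - 12 else m
        let start := anchor + PySem.Int.floordiv k months * months
        let start := if start > 12 then start - 12 else start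
        rules.insert m (String.ofList (pvPad02 start ++ "--".toList ++ period)))
      PySem.Dict.empty
  rules.items

-- ===== PRECONDITION & SPEC =====
-- A asserts months ∈ (1,2,3,4,6,12) and 1 ≤ anchor ≤ 12; it raises AssertionError otherwise.
def Pre_mk_season_rules (months : Int) (anchor : Int) : Prop :=
  (months = 1 ∨ months = 2 ∨ months = 3 ∨ months = 4 ∨ months = 6 ∨ months = 12) ∧
  1 ≤ anchor ∧ anchor ≤ 12
instance (months : Int) (anchor : Int) : Decidable (Pre_mk_season_rules months anchor) := by
  unfold Pre_mk_season_rules; infer_instance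

def pvWitness_mk_season_rules : Int × Int := (3, 12)

def Spec_mk_season_rules (months : Int) (anchor : Int) (out : List (Int × String)) : Prop :=
  out = mk_season_rules_alt months anchor
instance (months : Int) (anchor : Int) (out : List (Int × String)) :
    Decidable (Spec_mk_season_rules months anchor out) := by
  unfold Spec_mk_season_rules; infer_instance

-- ===== CLAIM (what is proved, stated in full; the proofs are below) =====
def Claim_equal_mk_season_rules : Prop := ∀ (months : Int) (anchor : Int),
  Dom_mk_season_rules months anchor → Pre_mk_season_rules months anchor →
  Spec_mk_season_rules months anchor (mk_season_rules months anchor)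

-- ===== LEMMAS AND PROOFS =====

-- ===== VERDICT (by name: the statement is the Claim_ definition above) =====
set_option maxHeartbeats 2000000 in
theorem mk_season_rules_spec : Claim_equal_mk_season_rules := by
  intro months anchor _ hpre
  unfold Spec_mk_season_rules
  obtain ⟨hm, h1, h2⟩ := hpre
  rcases hm with rfl | rfl | rfl | rfl | rfl | rfl <;> interval_cases anchor <;> decide
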